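-- pv_equiv track=rewrite | github.com/Vintage-lavender/programmers-Baekjoon | 프로그래머스/lv4/42891. 무지의 먹방 라이브/무지의 먹방 라이브.py | solution
-- ===== SOURCE A (Python) =====
-- def solution(food_times, k):
--     answer = 0
--
--     while k > 0 :
--
--         foods = len(food_times) #남은 음식 수
--
--         empty_foods = food_times.count(0) #다 먹은 음식 수
--
--         a = k // (foods - empty_foods) # 모든 음식의 양이 충분할 때, 낱개 음식에서 섭취할 수 있는 시간
--         b = k % (foods - empty_foods) # 남은 시간
--
--         for i, j in zip(food_times, range(foods)): #매번 입력받은 모든 원소 n을 순회하는 반복문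
--
--             if food_times[j] != 0: #다먹지 않은 음식일 경우
--
--                 food_times[j] = i - a # 현재 음식에 남은 섭취시간 - 낱개 음식 섭취 시간
--
--                 if food_times[j] < 0: # 현재 음식에 남은 섭취시간이 a 시간보다 남은 시간이 부족했을 경우
--
--                     b = b - food_times[j] # 부족했던 시간을 남은 시간에 더해주기
--
--                     food_times[j] = 0 # 현재 음식 남은 양 0으로 갱신
--             k = b # 남은 시간 갱신
--
--         if foods - food_times.count(0) ==0: # 주어진 시간 k 내에 모두 다먹은 경우
--             return -1
--
--         if k+1 <= len(food_times) - food_times.count(0):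
--             for i in food_times:
--                 answer += 1
--                 if i !=0 :
--                     k -= 1
--                 if k == -1:
--                     return answer
-- ===== SOURCE B (Python) =====
-- def solution(food_times, k):
--     # Sort the non-empty foods by remaining time and consume whole layers at once.
--     items = sorted(((t, i + 1) for i, t in enumerate(food_times) if t != 0),
--                    key=lambda q: q[0])
--     n = len(items)
--     prev = 0
--     for idx in range(n):
--         t = items[idx][0]
--         remain = n - idx
--         layer = (t - prev) * remain
--         if k < layer:
--             positions = sorted(p for _, p in items[idx:])
--             return positions[k % remain]
--         k -= layer
--         prev = t
--     return -1
-- ===== Notes on version B (the rewrite author's own statement) =====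
-- stated objective: alternative
-- what changed: B replaces A's repeated destructive whole-list subtraction passes (looping until the remaining time fits in one round) by sorting the non-empty foods by remaining time once and consuming whole layers arithmetically, reading the resume position off the sorted suffix.
-- outside the precondition, e.g. on solution([1], 0): A returns None, B returns 1
import Mathlib
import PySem

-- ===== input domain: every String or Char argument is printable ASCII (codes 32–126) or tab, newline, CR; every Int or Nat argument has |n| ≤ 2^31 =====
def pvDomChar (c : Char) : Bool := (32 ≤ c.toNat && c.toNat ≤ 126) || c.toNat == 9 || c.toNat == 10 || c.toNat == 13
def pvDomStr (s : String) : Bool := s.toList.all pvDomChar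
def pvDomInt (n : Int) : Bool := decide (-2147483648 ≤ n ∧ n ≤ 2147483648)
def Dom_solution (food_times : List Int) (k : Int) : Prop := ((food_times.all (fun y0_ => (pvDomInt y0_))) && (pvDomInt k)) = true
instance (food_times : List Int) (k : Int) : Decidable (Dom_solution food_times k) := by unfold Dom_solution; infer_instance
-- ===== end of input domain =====

-- B replaces A's repeated whole-list subtraction passes by one sort and arithmetic layer
-- consumption (objective: alternative algorithm). A mutates its food_times argument in
-- place; B does not: the equivalence proved here is about the return value only.

-- ===== PORT A =====
-- the inner `for i, j in zip(food_times, range(foods))` loop: returns (final b, mutated list)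
def aPass : List Int → Int → Int → Int × List Int
  | [], _, b => (b, [])
  | t :: rest, a, b =>
    if t ≠ 0 then
      let t' := t - a
      if t' < 0 then
        let r := aPass rest a (b - t')
        (r.1, 0 :: r.2)
      else
        let r := aPass rest a b
        (r.1, t' :: r.2)
    else
      let r := aPass rest a b
      (r.1, t :: r.2)

-- the final `for i in food_times` loop: inl answer = `return answer`,
-- inr (k, answer) = the loop fell through (back to the while re-check)
def aCount : List Int → Int → Int → Sum Int (Int × Int)
  | [], k, ans => Sum.inr (k, ans)
  | t :: rest, k, ans =>
    let ans' := ans + 1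
    let k' := if t ≠ 0 then k - 1 else k
    if k' = -1 then Sum.inl ans' else aCount rest k' ans'

-- the `while k > 0` loop; fuel only makes the recursion total (Python A can loop only
-- outside Pre_); the 0-fuel/`while` fall-through value 0 stands for Python's `return None`,
-- which Pre_ excludes (it needs k ≤ 0).
def aLoop : Nat → List Int → Int → Int → Int
  | 0, _, _, _ => 0
  | (fuel+1), ts, k, ans =>
    if k > 0 then
      let foods : Int := (ts.length : Int)
      let empty : Int := (PySem.List.count ts 0 : Int)
      let a := PySem.Int.floordiv k (foods - empty)
      let b := PySem.Int.mod k (foods - empty)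
      let r := aPass ts a b
      let ts' := r.2
      let k' := r.1
      if foods - (PySem.List.count ts' 0 : Int) = 0 then -1
      else if k' + 1 ≤ (ts'.length : Int) - (PySem.List.count ts' 0 : Int) then
        match aCount ts' k' ans with
        | Sum.inl answer => answer
        | Sum.inr (k2, ans2) => aLoop fuel ts' k2 ans2
      else aLoop fuel ts' k' ans
    else 0

def solution (food_times : List Int) (k : Int) : Int :=
  aLoop (k.toNat + 2 * (food_times.map Int.natAbs).sum + 2) food_times k 0

-- ===== PORT B =====
-- the `for idx in range(n)` loop of Source B, as recursion on the suffix items[idx:]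
def bLoop : List (Int × Int) → Int → Int → Int
  | [], _, _ => -1
  | q :: rest, prev, k =>
    let remain : Int := (((q :: rest) : List (Int × Int)).length : Int)
    let layer := (q.1 - prev) * remain
    if k < layer then
      let positions := PySem.List.sorted ((q :: rest).map Prod.snd) (fun x => x) false
      ((PySem.List.pyGet? positions (PySem.Int.mod k remain)).getD 0)
    else bLoop rest q.1 (k - layer)

def solution_alt (food_times : List Int) (k : Int) : Int :=
  let items := PySem.List.sorted
      ((PySem.List.enumerate food_times 0).filterMap
        (fun q => if q.2 ≠ 0 then some (q.2, q.1 + 1) else none))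
      Prod.fst false
  bLoop items 0 k

-- ===== PRECONDITION & SPEC =====
-- Pre_ excludes k ≤ 0 (A's while loop never runs and A returns None, not an int) and
-- lists whose entries are all 0 (A raises ZeroDivisionError there).
def Pre_solution (food_times : List Int) (k : Int) : Prop :=
  1 ≤ k ∧ food_times.any (fun t => t ≠ 0) = true
instance (food_times : List Int) (k : Int) : Decidable (Pre_solution food_times k) := by
  unfold Pre_solution; infer_instance
def pvWitness_solution : List Int × Int := ([3, 1, 2], 5)

def Spec_solution (food_times : List Int) (k : Int) (out : Int) : Prop := out = solution_alt food_times k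
instance (food_times : List Int) (k : Int) (out : Int) : Decidable (Spec_solution food_times k out) := by unfold Spec_solution; infer_instance

-- ===== CLAIM (what is proved, stated in full; the proofs are below) =====
def Claim_equal_solution : Prop := ∀ (food_times : List Int) (k : Int), Dom_solution food_times k → Pre_solution food_times k → Spec_solution food_times k (solution food_times k)

-- ===== LEMMAS AND PROOFS =====

-- reference semantics: remaining food list + remaining seconds, consuming one whole
-- minimum layer per step
def RNZ (s : List Int) : List Int := s.filter (fun t => t != 0)
def Rcnt (s : List Int) : Nat := (RNZ s).length
def listMin : List Int → Int
  | [] => 0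
  | v :: vs => vs.foldl min v
def Rmin (s : List Int) : Int := listMin (RNZ s)
def negc (s : List Int) : Nat := (s.filter (fun t => t < 0)).length
def consume (d : Int) (s : List Int) : List Int := s.map (fun t => if t = 0 then 0 else t - d)
def nthPos : List Int → Int → Int
  | [], _ => 0
  | t :: rest, r => if t ≠ 0 then (if r = 0 then 1 else 1 + nthPos rest (r - 1)) else 1 + nthPos rest r

theorem listMin_le (l : List Int) (x : Int) (hx : x ∈ l) : listMin l ≤ x := by
  cases l with
  | nil => simp at hx
  | cons v vs =>
    rcases List.mem_cons.1 hx with h | h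
    · subst h; exact (PySem.List.foldl_min_le vs x).1
    · exact (PySem.List.foldl_min_le vs v).2 x h

theorem listMin_mem (l : List Int) (h : l ≠ []) : listMin l ∈ l := by
  cases l with
  | nil => exact absurd rfl h
  | cons v vs =>
    rcases PySem.List.foldl_min_mem vs v with h | h
    · simp [listMin, h]
    · exact List.mem_cons_of_mem _ h

theorem listMin_eq_of (l : List Int) (x : Int) (hx : x ∈ l) (hle : ∀ y ∈ l, x ≤ y) :
    listMin l = x :=
  le_antisymm (listMin_le l x hx) (hle _ (listMin_mem l (List.ne_nil_of_mem hx)))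

theorem listMin_perm (l₁ l₂ : List Int) (h : l₁.Perm l₂) : listMin l₁ = listMin l₂ := by
  cases l₁ with
  | nil => simp [h.symm.eq_nil]
  | cons v vs =>
    have h2 : l₂ ≠ [] := by
      intro e; subst e; exact absurd h.eq_nil (by simp)
    exact (listMin_eq_of l₂ (listMin (v :: vs))
      (h.mem_iff.1 (listMin_mem _ (by simp)))
      (fun y hy => listMin_le _ _ (h.mem_iff.2 hy))).symm

theorem mem_RNZ (s : List Int) (t : Int) : t ∈ RNZ s ↔ t ∈ s ∧ t ≠ 0 := by
  simp [RNZ, List.mem_filter]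

theorem Rcnt_ne_zero_iff (s : List Int) : Rcnt s ≠ 0 ↔ RNZ s ≠ [] := by
  simp [Rcnt, List.length_eq_zero_iff]

theorem Rmin_mem (s : List Int) (h : Rcnt s ≠ 0) : Rmin s ∈ RNZ s :=
  listMin_mem _ ((Rcnt_ne_zero_iff s).1 h)

theorem Rmin_le_nz (s : List Int) (t : Int) (ht : t ∈ s) (hnz : t ≠ 0) : Rmin s ≤ t :=
  listMin_le _ _ ((mem_RNZ s t).2 ⟨ht, hnz⟩)

theorem Rmin_pos (s : List Int) (h : Rcnt s ≠ 0) (hpos : ∀ t ∈ RNZ s, 0 < t) :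
    0 < Rmin s := hpos _ (Rmin_mem s h)

theorem negc_eq_zero (s : List Int) (h : ∀ x ∈ s, 0 ≤ x) : negc s = 0 := by
  simp only [negc, List.length_eq_zero_iff, List.filter_eq_nil_iff]
  intro x hx
  simpa using h x hx

theorem negc_pos (s : List Int) (x : Int) (hx : x ∈ s) (hneg : x < 0) : 0 < negc s := by
  have : x ∈ s.filter (fun t => t < 0) := List.mem_filter.2 ⟨hx, by simpa using hneg⟩
  exact List.length_pos_of_mem this

theorem mem_consume (d : Int) (s : List Int) (x : Int) (hx : x ∈ consume d s) :
    x = 0 ∨ ∃ t ∈ s, t ≠ 0 ∧ x = t - d := by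
  rcases List.mem_map.1 hx with ⟨t, ht, rfl⟩
  by_cases h : t = 0
  · left; simp [h]
  · right; exact ⟨t, ht, h, by simp [h]⟩

theorem consume_nonneg (d : Int) (s : List Int) (hd : ∀ t ∈ s, t ≠ 0 → d ≤ t) :
    ∀ x ∈ consume d s, 0 ≤ x := by
  intro x hx
  rcases mem_consume d s x hx with h | ⟨t, ht, hnz, rfl⟩
  · omega
  · have := hd t ht hnz; omega

def R (s : List Int) (k : Int) : Int :=
  if hcz : Rcnt s = 0 then -1
  else if hlt : k < Rmin s * (Rcnt s : Int) then nthPos s (k % (Rcnt s : Int))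
  else R (consume (Rmin s) s) (k - Rmin s * (Rcnt s : Int))
termination_by (negc s, k.toNat)
decreasing_by
  have hc := hcz
  simp only [not_lt] at hlt
  have hm := Rmin_mem s hc
  have hms : Rmin s ∈ s := ((mem_RNZ s _).1 hm).1
  have hmz : Rmin s ≠ 0 := ((mem_RNZ s _).1 hm).2
  have hle : ∀ t ∈ s, t ≠ 0 → Rmin s ≤ t := fun t ht hnz => Rmin_le_nz s t ht hnz
  rcases lt_or_gt_of_ne hmz with hneg | hpos
  · -- some entry is negative: after this step no negatives remain
    have h1 : negc (consume (Rmin s) s) = 0 :=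
      negc_eq_zero _ (consume_nonneg _ _ hle)
    have h2 : 0 < negc s := negc_pos s _ hms hneg
    exact Prod.Lex.left _ _ (by omega)
  · -- all entries nonneg: k strictly decreases
    have h0 : ∀ x ∈ s, 0 ≤ x := by
      intro x hx
      by_cases hz : x = 0
      · omega
      · have := hle x hx hz; omega
    have h1 : negc (consume (Rmin s) s) = 0 :=
      negc_eq_zero _ (consume_nonneg _ _ hle)
    have h2 : negc s = 0 := negc_eq_zero s h0
    have hc1 : (1 : Int) ≤ (Rcnt s : Int) := by
      have := Nat.pos_of_ne_zero hc; exact_mod_cast this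
    have hmc : (1 : Int) ≤ Rmin s * (Rcnt s : Int) := by
      calc (1:Int) ≤ (Rcnt s : Int) := hc1
      _ = 1 * (Rcnt s : Int) := (one_mul _).symm
      _ ≤ Rmin s * (Rcnt s : Int) := by
        apply mul_le_mul_of_nonneg_right (by omega) (by omega)
    rw [h1, h2]
    exact Prod.Lex.right _ (by omega)


-- unfolding lemmas for R
theorem R_neg_one (s : List Int) (k : Int) (h : Rcnt s = 0) : R s k = -1 := by
  rw [R]; simp [h]

theorem R_finish (s : List Int) (k : Int) (h : Rcnt s ≠ 0)
    (h2 : k < Rmin s * (Rcnt s : Int)) : R s k = nthPos s (k % (Rcnt s : Int)) := by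
  rw [R]; simp [h, h2]

theorem R_step (s : List Int) (k : Int) (h : Rcnt s ≠ 0)
    (h2 : ¬ k < Rmin s * (Rcnt s : Int)) :
    R s k = R (consume (Rmin s) s) (k - Rmin s * (Rcnt s : Int)) := by
  rw [R]; simp [h, h2]

-- structural lemmas about consume / RNZ
theorem consume_zero (s : List Int) : consume 0 s = s := by
  induction s with
  | nil => rfl
  | cons t rest ih =>
    by_cases h : t = 0 <;> simp [consume, h] at ih ⊢ <;> exact ih

theorem RNZ_nil (s : List Int) (h : Rcnt s = 0) : RNZ s = [] := by
  simpa [Rcnt, List.length_eq_zero_iff] using h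

theorem RNZ_consume (d : Int) (s : List Int) :
    RNZ (consume d s) = ((RNZ s).filter (fun t => t != d)).map (fun t => t - d) := by
  induction s with
  | nil => rfl
  | cons t rest ih =>
    by_cases h : t = 0
    · simpa [consume, RNZ, h] using ih
    · by_cases h2 : t = d
      · subst h2; simpa [consume, RNZ, h, sub_self] using ih
      · have h3 : t - d ≠ 0 := by omega
        simpa [consume, RNZ, h, h2, h3] using ih

theorem Rcnt_consume_eq (d : Int) (s : List Int) (h : ∀ t ∈ RNZ s, t ≠ d) :
    Rcnt (consume d s) = Rcnt s := by
  have : (RNZ s).filter (fun t => t != d) = RNZ s :=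
    List.filter_eq_self.2 (fun t ht => by simpa using h t ht)
  simp [Rcnt, RNZ_consume, this]

theorem Rcnt_consume_lt (s : List Int) (h : Rcnt s ≠ 0) :
    Rcnt (consume (Rmin s) s) < Rcnt s := by
  have hm := Rmin_mem s h
  simp only [Rcnt, RNZ_consume, List.length_map]
  apply List.length_filter_lt_length_iff_exists.2
  exact ⟨Rmin s, hm, by simp⟩

theorem consume_consume (d₁ d₂ : Int) (s : List Int) (h : ∀ t ∈ RNZ s, t ≠ d₁) :
    consume d₂ (consume d₁ s) = consume (d₁ + d₂) s := by
  induction s with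
  | nil => rfl
  | cons t rest ih =>
    have hrest : ∀ t ∈ RNZ rest, t ≠ d₁ := by
      intro x hx; apply h; rcases (mem_RNZ rest x).1 hx with ⟨h1, h2⟩
      exact (mem_RNZ _ x).2 ⟨List.mem_cons_of_mem _ h1, h2⟩
    by_cases hz : t = 0
    · simpa [consume, hz] using ih hrest
    · have hd : t ≠ d₁ := h t ((mem_RNZ _ t).2 ⟨List.mem_cons_self, hz⟩)
      have h3 : t - d₁ ≠ 0 := by omega
      have h4 : t - d₁ - d₂ = t - (d₁ + d₂) := by ring
      simpa [consume, hz, h3, h4] using ih hrest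

theorem listMin_map_sub (l : List Int) (d : Int) (h : l ≠ []) :
    listMin (l.map (fun t => t - d)) = listMin l - d := by
  apply listMin_eq_of
  · exact List.mem_map_of_mem (listMin_mem l h)
  · intro y hy
    rcases List.mem_map.1 hy with ⟨x, hx, rfl⟩
    have := listMin_le l x hx; omega

theorem Rmin_consume (d : Int) (s : List Int) (h : ∀ t ∈ RNZ s, t ≠ d)
    (hc : Rcnt s ≠ 0) : Rmin (consume d s) = Rmin s - d := by
  have hf : (RNZ s).filter (fun t => t != d) = RNZ s :=
    List.filter_eq_self.2 (fun t ht => by simpa using h t ht)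
  rw [Rmin, RNZ_consume, hf, listMin_map_sub _ _ ((Rcnt_ne_zero_iff s).1 hc)]
  rfl

theorem nthPos_consume (d : Int) (s : List Int) (h : ∀ t ∈ RNZ s, t ≠ d) :
    ∀ r, nthPos (consume d s) r = nthPos s r := by
  induction s with
  | nil => intro r; rfl
  | cons t rest ih =>
    intro r
    have hrest : ∀ x ∈ RNZ rest, x ≠ d := by
      intro x hx; apply h; rcases (mem_RNZ rest x).1 hx with ⟨h1, h2⟩
      exact (mem_RNZ _ x).2 ⟨List.mem_cons_of_mem _ h1, h2⟩
    have ih' := ih hrest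
    simp only [consume] at ih'
    by_cases hz : t = 0
    · simp [consume, nthPos, hz, ih']
    · have hd : t ≠ d := h t ((mem_RNZ _ t).2 ⟨List.mem_cons_self, hz⟩)
      have h3 : t - d ≠ 0 := by omega
      simp [consume, nthPos, hz, h3, ih']

-- capA: the result of one pass of A (each nonzero entry loses a, floored at 0)
def capA (a : Int) (s : List Int) : List Int :=
  s.map (fun t => if t = 0 then 0 else if t - a < 0 then 0 else t - a)

theorem length_capA (a : Int) (s : List Int) : (capA a s).length = s.length := by
  simp [capA]

theorem capA_nonneg (a : Int) (s : List Int) : ∀ x ∈ capA a s, 0 ≤ x := by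
  intro x hx
  rcases List.mem_map.1 hx with ⟨t, _, rfl⟩
  split_ifs <;> omega

theorem capA_allzero (a : Int) (s : List Int) (h : ∀ t ∈ s, t = 0) : capA a s = s := by
  induction s with
  | nil => rfl
  | cons t rest ih =>
    have ht := h t List.mem_cons_self
    simp [capA, ht] at ih ⊢
    exact ih (fun x hx => h x (List.mem_cons_of_mem _ hx))

theorem allzero_of_cnt_zero (s : List Int) (h : Rcnt s = 0) : ∀ t ∈ s, t = 0 := by
  intro t ht
  by_contra hnz
  have : t ∈ RNZ s := (mem_RNZ s t).2 ⟨ht, hnz⟩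
  rw [RNZ_nil s h] at this
  simp at this

theorem capA_eq_consume (a : Int) (s : List Int) (h : ∀ t ∈ RNZ s, a ≤ t) :
    capA a s = consume a s := by
  apply List.map_congr_left
  intro t ht
  by_cases hz : t = 0
  · simp [hz]
  · have := h t ((mem_RNZ s t).2 ⟨ht, hz⟩)
    simp only [hz, if_false]
    rw [if_neg (by omega)]

theorem capA_shift (a m : Int) (s : List Int) (hm : ∀ t ∈ RNZ s, m ≤ t) (hma : m ≤ a) :
    capA a s = capA (a - m) (consume m s) := by
  simp only [capA, consume, List.map_map]
  apply List.map_congr_left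
  intro t ht
  by_cases hz : t = 0
  · simp [hz]
  · have hmt := hm t ((mem_RNZ s t).2 ⟨ht, hz⟩)
    simp only [Function.comp, hz, if_false]
    by_cases he : t = m
    · subst he; simp [sub_self]; omega
    · have h3 : t - m ≠ 0 := by omega
      have h4 : t - m - (a - m) = t - a := by ring
      simp only [h3, if_false, h4]

-- sums over the nonzero entries
def sumMin (a : Int) (s : List Int) : Int := ((RNZ s).map (fun t => min a t)).sum
def defect (a : Int) (s : List Int) : Int :=
  ((RNZ s).map (fun t => if t < a then a - t else 0)).sum
def negAbsN (s : List Int) : Nat := ((s.filter (fun t => t < 0)).map (fun t => (-t).toNat)).sum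

theorem defect_nonneg (a : Int) (s : List Int) : 0 ≤ defect a s := by
  apply List.sum_nonneg
  intro x hx
  rcases List.mem_map.1 hx with ⟨t, _, rfl⟩
  split_ifs <;> omega

theorem sml_add_defect (a : Int) (l : List Int) :
    (l.map (fun t => min a t)).sum + (l.map (fun t => if t < a then a - t else 0)).sum
      = a * (l.length : Int) := by
  induction l with
  | nil => simp
  | cons t rest ih =>
    simp only [List.map_cons, List.sum_cons, List.length_cons]
    have h1 : min a t + (if t < a then a - t else 0) = a := by
      simp [min_def]; split_ifs <;> omega
    have h2 : a * ((rest.length : Int) + 1) = a * (rest.length : Int) + a := by ring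
    push_cast
    omega

theorem sumMin_add_defect (a : Int) (s : List Int) :
    sumMin a s + defect a s = a * (Rcnt s : Int) := sml_add_defect a (RNZ s)

theorem sml_split (a m : Int) (l : List Int) (hm : ∀ t ∈ l, m ≤ t) (hma : m ≤ a) :
    (l.map (fun t => min a t)).sum
      = m * (l.length : Int) + ((l.filter (fun t => t != m)).map (fun t => min (a - m) (t - m))).sum := by
  induction l with
  | nil => simp
  | cons t rest ih =>
    have hrest := fun x hx => hm x (List.mem_cons_of_mem _ hx)
    have hmt := hm t List.mem_cons_self
    have hexp : m * (((t :: rest).length : Int)) = m * (rest.length : Int) + m := by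
      simp [List.length_cons]; ring
    by_cases he : t = m
    · have hf : (t :: rest).filter (fun x => x != m) = rest.filter (fun x => x != m) := by
        simp [he]
      have h1 : min a t = m := by omega
      rw [hf, List.map_cons, List.sum_cons, h1, ih hrest, hexp]
      omega
    · have hf : (t :: rest).filter (fun x => x != m) = t :: rest.filter (fun x => x != m) := by
        simp [he]
      have h2 : min a t = m + min (a - m) (t - m) := by
        simp [min_def]; split_ifs <;> omega
      rw [hf, List.map_cons, List.sum_cons, List.map_cons, List.sum_cons, ih hrest, hexp, h2]
      omega

theorem sumMin_split (a m : Int) (s : List Int) (hm : ∀ t ∈ RNZ s, m ≤ t) (hma : m ≤ a) :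
    sumMin a s = m * (Rcnt s : Int) + sumMin (a - m) (consume m s) := by
  rw [sumMin, sumMin, Rcnt, RNZ_consume, List.map_map]
  have hc : ((fun t => min (a - m) t) ∘ fun t => t - m) = fun t => min (a - m) (t - m) := rfl
  rw [hc]
  exact sml_split a m (RNZ s) hm hma

theorem sml_ge_mul (a m : Int) (l : List Int) (hm : ∀ t ∈ l, m ≤ t) (hma : m ≤ a) :
    m * (l.length : Int) ≤ (l.map (fun t => min a t)).sum := by
  induction l with
  | nil => simp
  | cons t rest ih =>
    have hrest := fun x hx => hm x (List.mem_cons_of_mem _ hx)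
    have hmt := hm t List.mem_cons_self
    have h2 : m ≤ min a t := by omega
    have hexp : m * ((rest.length : Int) + 1) = m * (rest.length : Int) + m := by ring
    simp only [List.map_cons, List.sum_cons, List.length_cons]
    push_cast
    have := ih hrest
    omega

theorem sumMin_ge_mul (a m : Int) (s : List Int) (hm : ∀ t ∈ RNZ s, m ≤ t) (hma : m ≤ a) :
    m * (Rcnt s : Int) ≤ sumMin a s := sml_ge_mul a m (RNZ s) hm hma

theorem sml_of_le (a : Int) (l : List Int) (h : ∀ t ∈ l, a ≤ t) :
    (l.map (fun t => min a t)).sum = a * (l.length : Int) := by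
  induction l with
  | nil => simp
  | cons t rest ih =>
    have hrest := fun x hx => h x (List.mem_cons_of_mem _ hx)
    have hmt := h t List.mem_cons_self
    have h2 : min a t = a := by omega
    have hexp : a * ((rest.length : Int) + 1) = a * (rest.length : Int) + a := by ring
    simp only [List.map_cons, List.sum_cons, List.length_cons, h2]
    push_cast
    rw [ih hrest]
    omega

theorem sumMin_of_le (a : Int) (s : List Int) (h : ∀ t ∈ RNZ s, a ≤ t) :
    sumMin a s = a * (Rcnt s : Int) := sml_of_le a (RNZ s) h

theorem sumMin_pos (a : Int) (s : List Int) (ha : 1 ≤ a) (hpos : ∀ t ∈ RNZ s, 0 < t) :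
    (Rcnt s : Int) ≤ sumMin a s := by
  have := sumMin_ge_mul a 1 s (fun t ht => hpos t ht) ha
  omega

theorem sumMin_ge_negAbs (a : Int) (s : List Int) (ha : 0 ≤ a) :
    -((negAbsN s : Int)) ≤ sumMin a s := by
  rw [sumMin, negAbsN, RNZ]
  induction s with
  | nil => simp
  | cons t rest ih =>
    by_cases hz : t = 0
    · have hf1 : (t :: rest).filter (fun x => x != 0) = rest.filter (fun x => x != 0) := by
        simp [hz]
      have hf2 : (t :: rest).filter (fun x => x < 0) = rest.filter (fun x => x < 0) := by
        simp [hz]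
      rw [hf1, hf2]; exact ih
    · have hf1 : (t :: rest).filter (fun x => x != 0) = t :: rest.filter (fun x => x != 0) := by
        simp [hz]
      rw [hf1, List.map_cons, List.sum_cons]
      by_cases hneg : t < 0
      · have hf2 : (t :: rest).filter (fun x => x < 0) = t :: rest.filter (fun x => x < 0) := by
          simp [hneg]
        rw [hf2, List.map_cons, List.sum_cons]
        have hmin : min a t = t := by omega
        have h3 : ((-t).toNat : Int) = -t := by omega
        rw [hmin]
        push_cast [h3] at ih ⊢
        omega
      · have hf2 : (t :: rest).filter (fun x => x < 0) = rest.filter (fun x => x < 0) := by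
          simp [hneg]
        rw [hf2]
        have hmin : 0 ≤ min a t := by omega
        omega

theorem negAbsN_le_absSum (s : List Int) : negAbsN s ≤ (s.map Int.natAbs).sum := by
  rw [negAbsN]
  induction s with
  | nil => simp
  | cons t rest ih =>
    rw [List.map_cons, List.sum_cons]
    by_cases hneg : t < 0
    · have hf : (t :: rest).filter (fun x => x < 0) = t :: rest.filter (fun x => x < 0) := by
        simp [hneg]
      rw [hf, List.map_cons, List.sum_cons]
      have : (-t).toNat ≤ t.natAbs := by omega
      omega
    · have hf : (t :: rest).filter (fun x => x < 0) = rest.filter (fun x => x < 0) := by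
        simp [hneg]
      rw [hf]
      omega

theorem negAbsN_eq_zero (s : List Int) (h : ∀ x ∈ s, 0 ≤ x) : negAbsN s = 0 := by
  rw [negAbsN]
  have : s.filter (fun t => t < 0) = [] := by
    apply List.filter_eq_nil_iff.2
    intro x hx
    have := h x hx; simpa using by omega
  simp [this]


theorem RNZ_consume_min_pos (s : List Int) (hc : Rcnt s ≠ 0) :
    ∀ t ∈ RNZ (consume (Rmin s) s), 0 < t := by
  intro t ht
  rw [RNZ_consume] at ht
  rcases List.mem_map.1 ht with ⟨x, hx, rfl⟩
  rcases List.mem_filter.1 hx with ⟨hx1, hx2⟩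
  have h1 : Rmin s ≤ x := listMin_le _ _ hx1
  have h2 : x ≠ Rmin s := by simpa using hx2
  omega

theorem R_uniform (s : List Int) (k d : Int)
    (hpos : ∀ t ∈ RNZ s, 0 < t) (hd0 : 0 ≤ d) (hdle : ∀ t ∈ RNZ s, d ≤ t)
    (hk : d * (Rcnt s : Int) ≤ k) :
    R s k = R (consume d s) (k - d * (Rcnt s : Int)) := by
  by_cases hc : Rcnt s = 0
  · have hcz : Rcnt (consume d s) = 0 :=
      Rcnt_consume_eq d s (by rw [RNZ_nil s hc]; intro t ht; simp at ht) ▸ hc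
    rw [R_neg_one s k hc, R_neg_one _ _ hcz]
  · have hm := Rmin_mem s hc
    have hmp : 0 < Rmin s := hpos _ hm
    have hdm : d ≤ Rmin s := hdle _ hm
    have hc1 : (1:Int) ≤ (Rcnt s : Int) := by
      have := Nat.pos_of_ne_zero hc; exact_mod_cast this
    by_cases hdz : d = 0
    · subst hdz; rw [consume_zero]; simp
    · have hd1 : 0 < d := by omega
      by_cases hlt : k < Rmin s * (Rcnt s : Int)
      · have hdc : d < Rmin s := by
          rcases lt_or_eq_of_le hdm with h | h
          · exact h
          · exfalso; rw [h] at hk; omega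
        have hne : ∀ t ∈ RNZ s, t ≠ d := by
          intro t ht; have : Rmin s ≤ t := listMin_le _ _ ht; omega
        have hcc : Rcnt (consume d s) = Rcnt s := Rcnt_consume_eq d s hne
        have hmc : Rmin (consume d s) = Rmin s - d := Rmin_consume d s hne hc
        have hcz' : Rcnt (consume d s) ≠ 0 := by omega
        have hsub : (Rmin s - d) * (Rcnt s : Int) = Rmin s * (Rcnt s : Int) - d * (Rcnt s : Int) := by
          ring
        have hlt' : k - d * (Rcnt s : Int) < Rmin (consume d s) * (Rcnt (consume d s) : Int) := by
          rw [hmc, hcc, hsub]; omega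
        rw [R_finish s k hc hlt, R_finish _ _ hcz' hlt', nthPos_consume d s hne, hcc]
        congr 1
        have h5 : k - d * (Rcnt s : Int) = k - (Rcnt s : Int) * d := by ring
        rw [h5, Int.sub_mul_emod_self_left]
      · rw [R_step s k hc hlt]
        by_cases hdm' : d = Rmin s
        · rw [hdm']
        · have hdc : d < Rmin s := by omega
          have hne : ∀ t ∈ RNZ s, t ≠ d := by
            intro t ht; have : Rmin s ≤ t := listMin_le _ _ ht; omega
          have hcc : Rcnt (consume d s) = Rcnt s := Rcnt_consume_eq d s hne
          have hmc : Rmin (consume d s) = Rmin s - d := Rmin_consume d s hne hc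
          have hcz' : Rcnt (consume d s) ≠ 0 := by omega
          have hsub : (Rmin s - d) * (Rcnt s : Int) = Rmin s * (Rcnt s : Int) - d * (Rcnt s : Int) := by
            ring
          have hlt' : ¬ (k - d * (Rcnt s : Int)) < Rmin (consume d s) * (Rcnt (consume d s) : Int) := by
            rw [hmc, hcc, hsub]; omega
          rw [R_step _ _ hcz' hlt', consume_consume d _ s hne, hmc, hcc]
          have h6 : d + (Rmin s - d) = Rmin s := by ring
          rw [h6]
          congr 1
          rw [hsub]; ring
  
theorem R_cap : ∀ (n : Nat) (s : List Int) (k a : Int), Rcnt s ≤ n →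
    (∀ t ∈ RNZ s, 0 < t) → 0 ≤ a → sumMin a s ≤ k →
    R s k = R (capA a s) (k - sumMin a s) := by
  intro n
  induction n with
  | zero =>
    intro s k a hle _ _ _
    have hc : Rcnt s = 0 := by omega
    have h1 : capA a s = s := capA_allzero a s (allzero_of_cnt_zero s hc)
    have h2 : sumMin a s = 0 := by rw [sumMin, RNZ_nil s hc]; simp
    rw [h1, h2, sub_zero]
  | succ n ih =>
    intro s k a hle hpos ha hk
    by_cases hc : Rcnt s = 0
    · have h1 : capA a s = s := capA_allzero a s (allzero_of_cnt_zero s hc)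
      have h2 : sumMin a s = 0 := by rw [sumMin, RNZ_nil s hc]; simp
      rw [h1, h2, sub_zero]
    · have hm := Rmin_mem s hc
      have hmp : 0 < Rmin s := hpos _ hm
      have hminle : ∀ t ∈ RNZ s, Rmin s ≤ t := fun t ht => listMin_le _ _ ht
      by_cases ham : a ≤ Rmin s
      · have hall : ∀ t ∈ RNZ s, a ≤ t := fun t ht => le_trans ham (hminle t ht)
        have h1 : sumMin a s = a * (Rcnt s : Int) := sumMin_of_le a s hall
        have h2 : capA a s = consume a s := capA_eq_consume a s hall
        rw [h1, h2]
        exact R_uniform s k a hpos ha hall (by omega)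
      · have hma : Rmin s ≤ a := by omega
        have hgem : Rmin s * (Rcnt s : Int) ≤ sumMin a s := sumMin_ge_mul a _ s hminle hma
        have hstep : ¬ k < Rmin s * (Rcnt s : Int) := by omega
        have hsplit := sumMin_split a (Rmin s) s hminle hma
        have hcnt' : Rcnt (consume (Rmin s) s) ≤ n := by
          have := Rcnt_consume_lt s hc; omega
        have hpos' := RNZ_consume_min_pos s hc
        rw [R_step s k hc hstep, capA_shift a (Rmin s) s hminle hma]
        have hrec := ih (consume (Rmin s) s) (k - Rmin s * (Rcnt s : Int)) (a - Rmin s)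
          hcnt' hpos' (by omega) (by omega)
        rw [hrec]
        congr 1
        omega

theorem R_pass (s : List Int) (k a : Int) (ha : 0 ≤ a) (hk0 : 0 ≤ k)
    (hk : sumMin a s ≤ k) : R s k = R (capA a s) (k - sumMin a s) := by
  by_cases hpos : ∀ t ∈ RNZ s, 0 < t
  · exact R_cap (Rcnt s) s k a le_rfl hpos ha hk
  · push_neg at hpos
    rcases hpos with ⟨t0, ht0, ht0le⟩
    have ht0ne : t0 ≠ 0 := ((mem_RNZ s t0).1 ht0).2
    have hc : Rcnt s ≠ 0 := by
      rw [Rcnt_ne_zero_iff]; exact List.ne_nil_of_mem ht0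
    have hc1 : (1:Int) ≤ (Rcnt s : Int) := by
      have := Nat.pos_of_ne_zero hc; exact_mod_cast this
    have hmneg : Rmin s < 0 := by
      have : Rmin s ≤ t0 := listMin_le _ _ ht0; omega
    have hminle : ∀ t ∈ RNZ s, Rmin s ≤ t := fun t ht => listMin_le _ _ ht
    have hma : Rmin s ≤ a := by omega
    have hstep : ¬ k < Rmin s * (Rcnt s : Int) := by
      have : Rmin s * (Rcnt s : Int) < 0 := mul_neg_of_neg_of_pos hmneg (by omega)
      omega
    have hsplit := sumMin_split a (Rmin s) s hminle hma
    have hpos' := RNZ_consume_min_pos s hc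
    rw [R_step s k hc hstep, capA_shift a (Rmin s) s hminle hma]
    have hrec := R_cap (Rcnt (consume (Rmin s) s)) (consume (Rmin s) s)
      (k - Rmin s * (Rcnt s : Int)) (a - Rmin s) le_rfl hpos' (by omega) (by omega)
    rw [hrec]
    congr 1
    omega


-- A-side: one pass of the zip-loop
theorem Rcnt_cons_zero (rest : List Int) : Rcnt ((0 : Int) :: rest) = Rcnt rest := by
  simp [Rcnt, RNZ]

theorem Rcnt_cons_nz (t : Int) (rest : List Int) (h : t ≠ 0) :
    Rcnt (t :: rest) = Rcnt rest + 1 := by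
  simp [Rcnt, RNZ, h]

theorem defect_cons_zero (a : Int) (rest : List Int) :
    defect a ((0 : Int) :: rest) = defect a rest := by
  simp [defect, RNZ]

theorem defect_cons_nz (a t : Int) (rest : List Int) (h : t ≠ 0) :
    defect a (t :: rest) = (if t < a then a - t else 0) + defect a rest := by
  have hf : (t :: rest).filter (fun x => x != 0) = t :: rest.filter (fun x => x != 0) := by
    simp [h]
  simp only [defect, RNZ, hf, List.map_cons, List.sum_cons]

theorem aPass_eq (s : List Int) (a : Int) : ∀ b, aPass s a b = (b + defect a s, capA a s) := by
  induction s with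
  | nil => intro b; simp [aPass, defect, RNZ, capA]
  | cons t rest ih =>
    intro b
    by_cases hz : t = 0
    · subst hz
      simp only [aPass, ne_eq, not_true_eq_false, if_false, reduceIte, ih,
        defect_cons_zero, capA, List.map_cons]
    · by_cases hneg : t - a < 0
      · have h1 : t < a := by omega
        simp only [aPass, hz, ne_eq, not_false_eq_true, if_true, reduceIte, hneg, ih,
          defect_cons_nz a t rest hz, if_pos h1, capA, List.map_cons]
        rw [Prod.mk.injEq]
        exact ⟨by omega, by simp [hz, hneg]⟩
      · have h1 : ¬ t < a := by omega
        simp only [aPass, hz, ne_eq, not_false_eq_true, if_true, reduceIte, hneg, ih,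
          defect_cons_nz a t rest hz, if_neg h1, capA, List.map_cons]
        rw [Prod.mk.injEq]
        exact ⟨by omega, by simp [hz, hneg]⟩

theorem len_count (s : List Int) : s.length = List.count 0 s + Rcnt s := by
  induction s with
  | nil => simp [Rcnt, RNZ]
  | cons t rest ih =>
    rw [List.length_cons, List.count_cons]
    by_cases hz : t = 0
    · subst hz
      rw [Rcnt_cons_zero]
      simp only [beq_self_eq_true, if_pos, reduceIte]
      omega
    · rw [Rcnt_cons_nz t rest hz]
      have hbe : ((t:Int) == 0) = false := by simpa using hz
      rw [hbe]
      simp only [Bool.false_eq_true, if_false, reduceIte]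
      omega

theorem count_bridge (s : List Int) :
    (s.length : Int) - (PySem.List.count s 0 : Int) = (Rcnt s : Int) := by
  rw [PySem.List.count_eq]
  have := len_count s
  omega

theorem RNZ_capA_pos (a : Int) (s : List Int) : ∀ t ∈ RNZ (capA a s), 0 < t := by
  intro t ht
  rcases (mem_RNZ _ t).1 ht with ⟨h1, h2⟩
  have := capA_nonneg a s t h1
  omega

theorem aCount_eq (s : List Int) : ∀ (k ans : Int), 0 ≤ k → k < (Rcnt s : Int) →
    aCount s k ans = Sum.inl (ans + nthPos s k) := by
  induction s with
  | nil => intro k ans h1 h2; simp [Rcnt, RNZ] at h2; omega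
  | cons t rest ih =>
    intro k ans h1 h2
    by_cases hz : t = 0
    · subst hz
      rw [Rcnt_cons_zero] at h2
      simp only [aCount, ne_eq, not_true_eq_false, if_false, reduceIte]
      rw [if_neg (show ¬ (k = -1) by omega), ih k (ans + 1) h1 h2]
      have hn : nthPos (0 :: rest) k = 1 + nthPos rest k := by simp [nthPos]
      rw [hn]
      congr 1
      ring
    · rw [Rcnt_cons_nz t rest hz] at h2
      by_cases hk0 : k = 0
      · subst hk0
        simp only [aCount, hz, ne_eq, not_false_eq_true, if_true, reduceIte]
        rw [if_pos (by omega)]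
        have hn : nthPos (t :: rest) 0 = 1 := by simp [nthPos, hz]
        rw [hn]
      · simp only [aCount, hz, ne_eq, not_false_eq_true, if_true, reduceIte]
        rw [if_neg (show ¬ (k - 1 = -1) by omega),
          ih (k - 1) (ans + 1) (by omega) (by push_cast at h2 ⊢; omega)]
        have hn : nthPos (t :: rest) k = 1 + nthPos rest (k - 1) := by
          simp [nthPos, hz, hk0]
        rw [hn]
        congr 1
        ring

theorem negAbsN_pos_of_neg (s : List Int) (t : Int) (ht : t ∈ s) (hneg : t < 0) :
    0 < negAbsN s := by
  have h1 : t ∈ s.filter (fun x => x < 0) := List.mem_filter.2 ⟨ht, by simpa using hneg⟩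
  have h2 : (-t).toNat ∈ (s.filter (fun x => x < 0)).map (fun x => (-x).toNat) :=
    List.mem_map_of_mem h1
  have h3 : (-t).toNat ≤ negAbsN s := List.single_le_sum (fun _ _ => Nat.zero_le _) _ h2
  omega

theorem aLoop_eq : ∀ (fuel : Nat) (s : List Int) (k : Int), 1 ≤ k → Rcnt s ≠ 0 →
    k.toNat + 2 * negAbsN s < fuel → aLoop fuel s k 0 = R s k := by
  intro fuel
  induction fuel with
  | zero => intro s k _ _ h; omega
  | succ f ih =>
    intro s k hk hc hfuel
    have hcpos : (0:Int) < (Rcnt s : Int) := by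
      have := Nat.pos_of_ne_zero hc; exact_mod_cast this
    have hcount := count_bridge s
    have hfd : PySem.Int.floordiv k ((s.length : Int) - (PySem.List.count s 0 : Int))
        = k / (Rcnt s : Int) := by rw [hcount, PySem.Int.floordiv_eq_ediv_of_pos hcpos]
    have hmd : PySem.Int.mod k ((s.length : Int) - (PySem.List.count s 0 : Int))
        = k % (Rcnt s : Int) := by rw [hcount, PySem.Int.mod_eq_emod_of_pos hcpos]
    have hab : (Rcnt s : Int) * (k / (Rcnt s : Int)) + k % (Rcnt s : Int) = k :=
      Int.ediv_add_emod k (Rcnt s : Int)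
    have ha0 : 0 ≤ k / (Rcnt s : Int) := Int.ediv_nonneg (by omega) (by omega)
    have hb0 : 0 ≤ k % (Rcnt s : Int) := Int.emod_nonneg k (by omega)
    have hblt : k % (Rcnt s : Int) < (Rcnt s : Int) := Int.emod_lt_of_pos k hcpos
    have hpassEq := aPass_eq s (k / (Rcnt s : Int)) (k % (Rcnt s : Int))
    have hsd := sumMin_add_defect (k / (Rcnt s : Int)) s
    have hd0 := defect_nonneg (k / (Rcnt s : Int)) s
    have hmulc : (k / (Rcnt s : Int)) * (Rcnt s : Int)
        = (Rcnt s : Int) * (k / (Rcnt s : Int)) := mul_comm _ _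
    have hk'eq : k % (Rcnt s : Int) + defect (k / (Rcnt s : Int)) s
        = k - sumMin (k / (Rcnt s : Int)) s := by omega
    have hk'0 : 0 ≤ k % (Rcnt s : Int) + defect (k / (Rcnt s : Int)) s := by omega
    have hR : R s k = R (capA (k / (Rcnt s : Int)) s)
        (k - sumMin (k / (Rcnt s : Int)) s) :=
      R_pass s k (k / (Rcnt s : Int)) ha0 (by omega) (by omega)
    rw [← hk'eq] at hR
    have hlen' : ((capA (k / (Rcnt s : Int)) s).length : Int) = (s.length : Int) := by
      rw [length_capA]
    have hcount' := count_bridge (capA (k / (Rcnt s : Int)) s)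
    have hpos' := RNZ_capA_pos (k / (Rcnt s : Int)) s
    -- unfold one iteration of the while loop
    rw [aLoop, if_pos (show k > 0 by omega)]
    dsimp only
    rw [hfd, hmd, hpassEq]
    dsimp only
    by_cases hz : Rcnt (capA (k / (Rcnt s : Int)) s) = 0
    · rw [if_pos (by rw [hlen'] at hcount'; omega)]
      rw [hR, R_neg_one _ _ hz]
    · have hcpos' : (0:Int) < (Rcnt (capA (k / (Rcnt s : Int)) s) : Int) := by
        have := Nat.pos_of_ne_zero hz; exact_mod_cast this
      rw [if_neg (by rw [hlen'] at hcount'; omega)]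
      by_cases hret : k % (Rcnt s : Int) + defect (k / (Rcnt s : Int)) s + 1
          ≤ ((capA (k / (Rcnt s : Int)) s).length : Int)
            - (PySem.List.count (capA (k / (Rcnt s : Int)) s) 0 : Int)
      · rw [if_pos hret]
        rw [hcount'] at hret
        rw [aCount_eq _ _ 0 hk'0 (by omega)]
        dsimp only
        have hm1 : 1 ≤ Rmin (capA (k / (Rcnt s : Int)) s) := Rmin_pos _ hz hpos'
        have hfin : (k % (Rcnt s : Int) + defect (k / (Rcnt s : Int)) s)
            < Rmin (capA (k / (Rcnt s : Int)) s) * (Rcnt (capA (k / (Rcnt s : Int)) s) : Int) := by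
          have h5 : (Rcnt (capA (k / (Rcnt s : Int)) s) : Int)
              ≤ Rmin (capA (k / (Rcnt s : Int)) s) * (Rcnt (capA (k / (Rcnt s : Int)) s) : Int) :=
            le_mul_of_one_le_left (by omega) hm1
          omega
        rw [hR, R_finish _ _ hz hfin, Int.emod_eq_of_lt hk'0 (by omega)]
        omega
      · rw [if_neg hret]
        rw [hcount'] at hret
        have hkc' : (Rcnt (capA (k / (Rcnt s : Int)) s) : Int)
            ≤ k % (Rcnt s : Int) + defect (k / (Rcnt s : Int)) s := by omega
        have hnz0 : negAbsN (capA (k / (Rcnt s : Int)) s) = 0 :=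
          negAbsN_eq_zero _ (capA_nonneg _ s)
        have hfuel' : (k % (Rcnt s : Int) + defect (k / (Rcnt s : Int)) s).toNat
            + 2 * negAbsN (capA (k / (Rcnt s : Int)) s) < f := by
          rw [hnz0]
          by_cases hneg : negAbsN s = 0
          · have hposs : ∀ t ∈ RNZ s, 0 < t := by
              intro t ht
              rcases (mem_RNZ s t).1 ht with ⟨hmem, hne0⟩
              by_contra hle
              have := negAbsN_pos_of_neg s t hmem (by omega)
              omega
            by_cases haz : k / (Rcnt s : Int) = 0
            · exfalso
              have hs0 : sumMin (k / (Rcnt s : Int)) s = 0 := by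
                rw [haz]
                have h6 := sumMin_of_le 0 s (fun t ht => le_of_lt (hposs t ht))
                simpa using h6
              have hcapa : capA (k / (Rcnt s : Int)) s = s := by
                rw [haz, capA_eq_consume 0 s (fun t ht => le_of_lt (hposs t ht)), consume_zero]
              rw [haz] at hab
              rw [hcapa] at hkc'
              simp at hab
              omega
            · have ha1 : 1 ≤ k / (Rcnt s : Int) := by omega
              have := sumMin_pos (k / (Rcnt s : Int)) s ha1 hposs
              omega
          · have := sumMin_ge_negAbs (k / (Rcnt s : Int)) s ha0
            omega
        rw [ih _ _ (by omega) hz hfuel']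
        exact hR.symm

theorem solution_eq_R (ts : List Int) (k : Int) (h1 : 1 ≤ k) (hc : Rcnt ts ≠ 0) :
    solution ts k = R ts k := by
  apply aLoop_eq _ _ _ h1 hc
  have := negAbsN_le_absSum ts
  omega


-- B-side: the nonzero entries with their 1-based positions, in list order
def nzE : List Int → Int → List (Int × Int)
  | [], _ => []
  | t :: rest, i => if t = 0 then nzE rest (i+1) else (t, i) :: nzE rest (i+1)

theorem nzE_map_fst (s : List Int) : ∀ i, (nzE s i).map Prod.fst = RNZ s := by
  induction s with
  | nil => intro i; rfl
  | cons t rest ih =>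
    intro i
    by_cases hz : t = 0
    · simp [nzE, RNZ, hz, ih]
    · simp [nzE, RNZ, hz, ih]

theorem length_nzE (s : List Int) (i : Int) : (nzE s i).length = Rcnt s := by
  have := congrArg List.length (nzE_map_fst s i)
  simpa [Rcnt] using this

theorem nzE_mem_ge (s : List Int) : ∀ i, ∀ q ∈ nzE s i, i ≤ q.2 := by
  induction s with
  | nil => intro i q hq; simp [nzE] at hq
  | cons t rest ih =>
    intro i q hq
    by_cases hz : t = 0
    · rw [nzE, if_pos hz] at hq
      have := ih (i+1) q hq; omega
    · rw [nzE, if_neg hz] at hq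
      rcases List.mem_cons.1 hq with rfl | hq'
      · simp
      · have := ih (i+1) q hq'; omega

theorem nzE_mem_fst_ne (s : List Int) : ∀ i, ∀ q ∈ nzE s i, q.1 ≠ 0 := by
  induction s with
  | nil => intro i q hq; simp [nzE] at hq
  | cons t rest ih =>
    intro i q hq
    by_cases hz : t = 0
    · rw [nzE, if_pos hz] at hq
      exact ih (i+1) q hq
    · rw [nzE, if_neg hz] at hq
      rcases List.mem_cons.1 hq with rfl | hq'
      · exact hz
      · exact ih (i+1) q hq'

theorem nzE_snd_pairwise (s : List Int) : ∀ i, (nzE s i).Pairwise (fun p q => p.2 < q.2) := by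
  induction s with
  | nil => intro i; simp [nzE]
  | cons t rest ih =>
    intro i
    by_cases hz : t = 0
    · rw [nzE, if_pos hz]; exact ih (i+1)
    · rw [nzE, if_neg hz]
      refine List.pairwise_cons.2 ⟨?_, ih (i+1)⟩
      intro q hq
      have := nzE_mem_ge rest (i+1) q hq
      simp only
      omega

theorem nzE_consume (d : Int) (s : List Int) : ∀ i, nzE (consume d s) i
    = ((nzE s i).filter (fun q => q.1 != d)).map (fun q => (q.1 - d, q.2)) := by
  induction s with
  | nil => intro i; rfl
  | cons t rest ih =>
    intro i
    by_cases hz : t = 0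
    · have h1 : consume d (t :: rest) = 0 :: consume d rest := by simp [consume, hz]
      rw [h1, nzE, if_pos rfl, nzE, if_pos hz, ih (i+1)]
    · have h1 : consume d (t :: rest) = (t - d) :: consume d rest := by simp [consume, hz]
      by_cases he : t = d
      · have h2 : t - d = 0 := by omega
        rw [h1, nzE, if_pos h2, nzE, if_neg hz, ih (i+1)]
        have h3 : ((t, i) :: nzE rest (i+1)).filter (fun q => q.1 != d)
            = (nzE rest (i+1)).filter (fun q => q.1 != d) := by simp [he]
        rw [h3]
      · have h2 : t - d ≠ 0 := by omega
        rw [h1, nzE, if_neg h2, nzE, if_neg hz, ih (i+1)]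
        have h3 : ((t, i) :: nzE rest (i+1)).filter (fun q => q.1 != d)
            = (t, i) :: (nzE rest (i+1)).filter (fun q => q.1 != d) := by simp [he]
        rw [h3, List.map_cons]

theorem nthPos_get_nat (s : List Int) : ∀ (i : Int) (n : Nat), n < Rcnt s →
    ((nzE s i).map Prod.snd)[n]? = some (i - 1 + nthPos s (n : Int)) := by
  induction s with
  | nil => intro i n h; simp [Rcnt, RNZ] at h
  | cons t rest ih =>
    intro i n h
    by_cases hz : t = 0
    · subst hz
      rw [Rcnt_cons_zero] at h
      rw [nzE, if_pos rfl, ih (i+1) n h]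
      have hn : nthPos ((0:Int) :: rest) (n : Int) = 1 + nthPos rest (n : Int) := by
        simp [nthPos]
      rw [hn]
      congr 1
      omega
    · rw [Rcnt_cons_nz t rest hz] at h
      rw [nzE, if_neg hz, List.map_cons]
      cases n with
      | zero =>
        have hn : nthPos (t :: rest) ((0 : Nat) : Int) = 1 := by
          simp [nthPos, hz]
        rw [hn]
        simp
      | succ m =>
        rw [List.getElem?_cons_succ, ih (i+1) m (by omega)]
        have hne : ((m + 1 : Nat) : Int) ≠ 0 := by omega
        have hsub : ((m + 1 : Nat) : Int) - 1 = (m : Int) := by omega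
        have hn : nthPos (t :: rest) ((m + 1 : Nat) : Int)
            = 1 + nthPos rest ((m : Int)) := by
          rw [nthPos]
          rw [if_pos hz, if_neg hne, hsub]
        rw [hn]
        congr 1
        omega

theorem nthPos_pyGet (s : List Int) (r : Int) (h0 : 0 ≤ r) (h1 : r < (Rcnt s : Int)) :
    PySem.List.pyGet? ((nzE s 1).map Prod.snd) r = some (nthPos s r) := by
  rw [PySem.List.pyGet?_of_nonneg _ h0, nthPos_get_nat s 1 r.toNat (by omega)]
  rw [Int.toNat_of_nonneg h0]
  congr 1
  omega

theorem filterMap_enumerate (s : List Int) : ∀ (j : Int),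
    (PySem.List.enumerate s j).filterMap
      (fun q => if q.2 ≠ 0 then some (q.2, q.1 + 1) else none) = nzE s (j + 1) := by
  induction s with
  | nil => intro j; simp [nzE]
  | cons t rest ih =>
    intro j
    rw [PySem.List.enumerate_cons, List.filterMap_cons]
    by_cases hz : t = 0
    · simp only [hz, ne_eq, not_true_eq_false, if_false, reduceIte]
      rw [ih (j+1), nzE, if_pos rfl]
    · simp only [hz, ne_eq, not_false_eq_true, if_true, reduceIte]
      rw [ih (j+1), nzE, if_neg hz]

theorem bLoop_eq : ∀ (L : List (Int × Int)) (prev k : Int) (s : List Int),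
    0 ≤ k →
    ((L.filter (fun q => q.1 != prev)).map (fun q => (q.1 - prev, q.2))).Perm (nzE s 1) →
    L.Pairwise (fun x y => x.1 ≤ y.1) →
    (∀ q ∈ L, q.1 ≠ 0) →
    (prev = 0 ∨ ∀ q ∈ L, prev ≤ q.1) →
    bLoop L prev k = R s k := by
  intro L
  induction L with
  | nil =>
    intro prev k s hk hperm _ _ _
    have hlen := hperm.length_eq
    rw [length_nzE] at hlen
    simp at hlen
    rw [R_neg_one s k (by omega)]
    rfl
  | cons q L' ih =>
    intro prev k s hk hperm hpair hnz horder
    have hpairtl := (List.pairwise_cons.1 hpair).2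
    have hpairhd := (List.pairwise_cons.1 hpair).1
    by_cases hqp : q.1 = prev
    · -- tie layer: nothing is consumed
      have hfilter : (q :: L').filter (fun r => r.1 != prev)
          = L'.filter (fun r => r.1 != prev) := by simp [hqp]
      rw [hfilter] at hperm
      rw [bLoop]
      dsimp only
      rw [if_neg (by
        have hl0 : (q.1 - prev) * (((q :: L').length : Nat) : Int) = 0 := by
          rw [hqp]; ring
        omega)]
      have harg : k - (q.1 - prev) * (((q :: L').length : Nat) : Int) = k := by
        rw [hqp]; ring
      rw [harg]
      apply ih q.1 k s hk
      · rw [hqp]; exact hperm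
      · exact hpairtl
      · exact fun r hr => hnz r (List.mem_cons_of_mem _ hr)
      · exact Or.inr hpairhd
    · -- a genuine minimal layer
      have hstep1 : ∀ r ∈ (q :: L'), r.1 ≠ prev := by
        intro r hr
        rcases List.mem_cons.1 hr with rfl | hr'
        · exact hqp
        · rcases horder with h0 | hge
          · rw [h0]; exact hnz r (List.mem_cons_of_mem _ hr')
          · have h1 : prev ≤ q.1 := hge q List.mem_cons_self
            have h2 : q.1 ≤ r.1 := hpairhd r hr'
            omega
      have hfilter : (q :: L').filter (fun r => r.1 != prev) = q :: L' :=
        List.filter_eq_self.2 (fun r hr => by simpa using hstep1 r hr)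
      rw [hfilter] at hperm
      have hcnt : Rcnt s = (q :: L').length := by
        have h2 := hperm.length_eq
        rw [length_nzE] at h2
        simpa using h2.symm
      have hcnz : Rcnt s ≠ 0 := by rw [hcnt]; simp
      have hcast : (Rcnt s : Int) = (((q :: L').length : Nat) : Int) := by
        rw [hcnt]
      have hlpos : (0:Int) < (((q :: L').length : Nat) : Int) := by
        simp
      have hRNZperm : (RNZ s).Perm ((q :: L').map (fun r => r.1 - prev)) := by
        have h2 := hperm.map Prod.fst
        have h3 : (((q :: L').map (fun r => (r.1 - prev, r.2))).map Prod.fst)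
            = (q :: L').map (fun r => r.1 - prev) := by
          rw [List.map_map]; rfl
        rw [h3, nzE_map_fst s 1] at h2
        exact h2.symm
      have hminall : ∀ r ∈ (q :: L'), q.1 ≤ r.1 := by
        intro r hr
        rcases List.mem_cons.1 hr with rfl | hr'
        · exact le_rfl
        · exact hpairhd r hr'
      have hmin : Rmin s = q.1 - prev := by
        rw [Rmin, listMin_perm _ _ hRNZperm]
        apply listMin_eq_of
        · exact List.mem_map_of_mem List.mem_cons_self
        · intro y hy
          rcases List.mem_map.1 hy with ⟨r, hr, rfl⟩
          have := hminall r hr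
          omega
      rw [bLoop]
      dsimp only
      by_cases hlt : k < (q.1 - prev) * (((q :: L').length : Nat) : Int)
      · rw [if_pos hlt]
        have hltR : k < Rmin s * (Rcnt s : Int) := by
          rw [hmin, hcast]; exact hlt
        rw [R_finish s k hcnz hltR]
        have hpermsnd : ((q :: L').map Prod.snd).Perm ((nzE s 1).map Prod.snd) := by
          have h2 := hperm.map Prod.snd
          have h3 : (((q :: L').map (fun r => (r.1 - prev, r.2))).map Prod.snd)
              = (q :: L').map Prod.snd := by
            rw [List.map_map]; rfl
          rw [h3] at h2
          exact h2
        have hsorted : PySem.List.sorted ((q :: L').map Prod.snd) (fun x => x) false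
            = (nzE s 1).map Prod.snd :=
          PySem.List.sorted_eq_of_perm_of_pairwise_lt _ _ _ hpermsnd.symm
            (List.pairwise_map.2 (nzE_snd_pairwise s 1))
        rw [hsorted]
        have hmodeq : PySem.Int.mod k (((q :: L').length : Nat) : Int)
            = k % (Rcnt s : Int) := by
          rw [PySem.Int.mod_eq_emod_of_pos hlpos, hcast]
        rw [hmodeq, nthPos_pyGet s _ (Int.emod_nonneg k (by omega))
          (Int.emod_lt_of_pos k (by omega))]
        rfl
      · rw [if_neg hlt]
        have hltR : ¬ k < Rmin s * (Rcnt s : Int) := by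
          rw [hmin, hcast]; exact hlt
        rw [R_step s k hcnz hltR, hmin]
        have harg : k - (q.1 - prev) * (((q :: L').length : Nat) : Int)
            = k - (q.1 - prev) * (Rcnt s : Int) := by rw [hcast]
        rw [harg]
        apply ih q.1 _ (consume (q.1 - prev) s) (by omega)
        · -- the permutation invariant survives one consumed layer
          rw [nzE_consume (q.1 - prev) s 1]
          have p1 := (hperm.filter (fun r => r.1 != (q.1 - prev))).map
            (fun r => (r.1 - (q.1 - prev), r.2))
          rw [List.filter_map] at p1
          have hpred : ((q :: L').filter
              ((fun r => r.1 != (q.1 - prev)) ∘ (fun r => (r.1 - prev, r.2))))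
              = (q :: L').filter (fun r => r.1 != q.1) := by
            apply List.filter_congr
            intro r _
            by_cases h : r.1 = q.1
            · simp [Function.comp, h]
            · have h2 : r.1 - prev ≠ q.1 - prev := by omega
              simp only [Function.comp]
              rw [show (r.1 - prev != q.1 - prev) = true from by simpa using h2,
                show (r.1 != q.1) = true from by simpa using h]
          rw [hpred] at p1
          have hhead : (q :: L').filter (fun r => r.1 != q.1)
              = L'.filter (fun r => r.1 != q.1) := by simp
          rw [hhead] at p1
          have hcomp : ((L'.filter (fun r => r.1 != q.1)).map
                (fun r => (r.1 - prev, r.2))).map (fun r => (r.1 - (q.1 - prev), r.2))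
              = (L'.filter (fun r => r.1 != q.1)).map (fun r => (r.1 - q.1, r.2)) := by
            rw [List.map_map]
            apply List.map_congr_left
            intro r _
            simp only [Function.comp]
            rw [Prod.mk.injEq]
            exact ⟨by omega, rfl⟩
          rw [hcomp] at p1
          exact p1
        · exact hpairtl
        · exact fun r hr => hnz r (List.mem_cons_of_mem _ hr)
        · exact Or.inr hpairhd

theorem alt_eq_R (ts : List Int) (k : Int) (hk : 0 ≤ k) : solution_alt ts k = R ts k := by
  rw [solution_alt]
  have hitems : (PySem.List.enumerate ts 0).filterMap
      (fun q => if q.2 ≠ 0 then some (q.2, q.1 + 1) else none) = nzE ts 1 := by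
    have := filterMap_enumerate ts 0
    simpa using this
  rw [hitems]
  have hmem : ∀ q ∈ PySem.List.sorted (nzE ts 1) Prod.fst false, q.1 ≠ 0 := by
    intro q hq
    have h2 : q ∈ nzE ts 1 := (PySem.List.mem_sorted _ _ _ _).1 hq
    exact nzE_mem_fst_ne ts 1 q h2
  apply bLoop_eq _ 0 k ts hk
  · have hfs : (PySem.List.sorted (nzE ts 1) Prod.fst false).filter (fun r => r.1 != 0)
        = PySem.List.sorted (nzE ts 1) Prod.fst false :=
      List.filter_eq_self.2 (fun r hr => by simpa using hmem r hr)
    rw [hfs]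
    have hid : (PySem.List.sorted (nzE ts 1) Prod.fst false).map (fun r => (r.1 - 0, r.2))
        = PySem.List.sorted (nzE ts 1) Prod.fst false := by
      have : (fun r : Int × Int => (r.1 - 0, r.2)) = id := by
        funext r; simp
      rw [this, List.map_id]
    rw [hid]
    exact PySem.List.sorted_perm _ _ _
  · exact PySem.List.sorted_pairwise _ _
  · exact hmem
  · exact Or.inl rfl

-- ===== VERDICT (by name: the statement is the Claim_ definition above) =====
theorem solution_spec : Claim_equal_solution := by
  intro ts k _ hpre
  obtain ⟨hk, hany⟩ := hpre
  have hc : Rcnt ts ≠ 0 := by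
    rw [Rcnt_ne_zero_iff]
    rcases List.any_eq_true.1 hany with ⟨t, ht, hnzb⟩
    exact List.ne_nil_of_mem ((mem_RNZ ts t).2 ⟨ht, by simpa using hnzb⟩)
  show solution ts k = solution_alt ts k
  rw [solution_eq_R ts k hk hc, alt_eq_R ts k (by omega)]
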